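-- pv_equiv track=rewrite | github.com/soyjubilado/AdventOfCode | 2025/04/prog202504.py | Removeables
-- ===== SOURCE A (Python) =====
-- def Neighbors(coords):
--   """List the neighbors of this xy coordinate."""
--   x, y = coords
--   return [(x-1, y-1), (x, y-1), (x+1, y-1),
--           (x-1, y), (x+1, y),
--           (x-1, y+1), (x, y+1), (x+1, y+1)]
--
-- def Removeables(warehouse):
--   """Return a list of removeable locations."""
--   overlay = {}
--   for coords, value in warehouse.items():
--     if value != '@':
--       continue
--     neighbors = Neighbors(coords)
--     num_neighbors = len([i for i in neighbors if i in warehouse and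
--                          warehouse[i] == '@'])
--     if num_neighbors < 4:
--       overlay[coords] = 'x'
--   return overlay
-- ===== SOURCE B (Python) =====
-- def Removeables(warehouse):
--   """Return a list of removeable locations."""
--   ats = [c for c, v in warehouse.items() if v == '@']
--   overlay = {}
--   for c in ats:
--     n = sum(1 for a in ats
--             if a != c and abs(a[0] - c[0]) <= 1 and abs(a[1] - c[1]) <= 1)
--     if n < 4:
--       overlay[c] = 'x'
--   return overlay
-- ===== Notes on version B (the rewrite author's own statement) =====
-- stated objective: alternative
-- what changed: B first extracts the list of '@' coordinates, then for each such cell counts the other '@' cells inside its Chebyshev-distance-1 box by scanning that list, instead of A's enumeration of the 8 neighbor coordinates with a dict lookup for each.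
import Mathlib
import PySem

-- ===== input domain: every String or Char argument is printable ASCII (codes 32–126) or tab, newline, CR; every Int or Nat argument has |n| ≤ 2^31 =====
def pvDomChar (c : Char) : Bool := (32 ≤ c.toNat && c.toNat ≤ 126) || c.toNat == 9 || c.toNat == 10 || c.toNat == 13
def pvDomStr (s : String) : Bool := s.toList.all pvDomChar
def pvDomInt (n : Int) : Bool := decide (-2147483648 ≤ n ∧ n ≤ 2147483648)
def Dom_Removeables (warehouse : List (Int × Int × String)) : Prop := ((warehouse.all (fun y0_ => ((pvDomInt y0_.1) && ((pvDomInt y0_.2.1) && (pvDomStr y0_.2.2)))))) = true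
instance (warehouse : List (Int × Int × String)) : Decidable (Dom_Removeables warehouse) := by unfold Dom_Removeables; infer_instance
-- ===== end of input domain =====

-- B replaces A's per-cell enumeration of the 8 neighbor coordinates with dict lookups by a
-- Chebyshev-distance-1 count over the extracted list of '@' coordinates (objective: alternative).

-- ===== PORT A =====
-- first-match lookup in the warehouse association list (= Python dict access by key)
def whGet? (warehouse : List (Int × Int × String)) (k : Int × Int) : Option String :=
  match warehouse with
  | [] => none
  | (x, y, v) :: t => if (x, y) = k then some v else whGet? t k

def Neighbors (coords : Int × Int) : List (Int × Int) :=
  [(coords.1 - 1, coords.2 - 1), (coords.1, coords.2 - 1), (coords.1 + 1, coords.2 - 1),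
   (coords.1 - 1, coords.2), (coords.1 + 1, coords.2),
   (coords.1 - 1, coords.2 + 1), (coords.1, coords.2 + 1), (coords.1 + 1, coords.2 + 1)]

def Removeables (warehouse : List (Int × Int × String)) : List (Int × Int × String) :=
  (warehouse.foldl
    (fun (overlay : PySem.Dict (Int × Int) String) e =>
      if e.2.2 ≠ "@" then overlay
      else
        let neighbors := Neighbors (e.1, e.2.1)
        let num_neighbors := (neighbors.filter (fun i => whGet? warehouse i == some "@")).length
        if num_neighbors < 4 then overlay.insert (e.1, e.2.1) "x" else overlay)
    PySem.Dict.empty).items.map (fun p => (p.1.1, p.1.2, p.2))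

-- ===== PORT B =====
-- a is in the Chebyshev-distance-1 box around c (and is not c itself)
def near (a c : Int × Int) : Bool :=
  decide (a ≠ c ∧ (a.1 - c.1).natAbs ≤ 1 ∧ (a.2 - c.2).natAbs ≤ 1)

def Removeables_alt (warehouse : List (Int × Int × String)) : List (Int × Int × String) :=
  let ats := warehouse.filterMap (fun e => if e.2.2 = "@" then some (e.1, e.2.1) else none)
  ats.filterMap (fun c => if ats.countP (fun a => near a c) < 4 then some (c.1, c.2, "x") else none)

-- ===== PRECONDITION & SPEC =====
-- Python's warehouse is a dict, so its keys are unique by construction; Pre_ states exactly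
-- that for the association-list encoding (it excludes no Python input of A).
def Pre_Removeables (warehouse : List (Int × Int × String)) : Prop :=
  (warehouse.map (fun e => (e.1, e.2.1))).Nodup
instance (warehouse : List (Int × Int × String)) : Decidable (Pre_Removeables warehouse) := by
  unfold Pre_Removeables; infer_instance

def pvWitness_Removeables : (List (Int × Int × String)) :=
  [(0, 0, "@"), (1, 0, "@"), (0, 1, "@"), (1, 1, "@"), (2, 2, "@"), (5, 5, ".")]

def Spec_Removeables (warehouse : List (Int × Int × String)) (out : List (Int × Int × String)) : Prop := out = Removeables_alt warehouse
instance (warehouse : List (Int × Int × String)) (out : List (Int × Int × String)) : Decidable (Spec_Removeables warehouse out) := by unfold Spec_Removeables; infer_instance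

-- ===== CLAIM (what is proved, stated in full; the proofs are below) =====
def Claim_equal_Removeables : Prop := ∀ (warehouse : List (Int × Int × String)), Dom_Removeables warehouse → Pre_Removeables warehouse → Spec_Removeables warehouse (Removeables warehouse)

-- ===== LEMMAS AND PROOFS =====

-- A's per-cell neighbor count
def cntA (wh : List (Int × Int × String)) (c : Int × Int) : Nat :=
  ((Neighbors c).filter (fun i => whGet? wh i == some "@")).length

-- the body of A's loop, named for the fold lemma
def stepA (wh : List (Int × Int × String)) (overlay : PySem.Dict (Int × Int) String)
    (e : Int × Int × String) : PySem.Dict (Int × Int) String :=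
  if e.2.2 ≠ "@" then overlay
  else if cntA wh (e.1, e.2.1) < 4 then overlay.insert (e.1, e.2.1) "x" else overlay

-- the '@' coordinate list B extracts
def atsOf (warehouse : List (Int × Int × String)) : List (Int × Int) :=
  warehouse.filterMap (fun e => if e.2.2 = "@" then some (e.1, e.2.1) else none)

lemma atsOf_eq (warehouse : List (Int × Int × String)) :
    atsOf warehouse = (warehouse.filter (fun e => e.2.2 = "@")).map (fun e => (e.1, e.2.1)) := by
  unfold atsOf
  induction warehouse with
  | nil => rfl
  | cons e t ih => by_cases h : e.2.2 = "@" <;> simp [h, ih]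

lemma mem_atsOf (warehouse : List (Int × Int × String)) (c : Int × Int) :
    c ∈ atsOf warehouse ↔ (c.1, c.2, "@") ∈ warehouse := by
  obtain ⟨cx, cy⟩ := c
  unfold atsOf
  simp only [List.mem_filterMap]
  constructor
  · rintro ⟨⟨x, y, v⟩, hm, he⟩
    simp only [Option.ite_none_right_eq_some, Option.some.injEq, Prod.mk.injEq] at he
    obtain ⟨hv, h1, h2⟩ := he
    subst hv h1 h2; exact hm
  · intro h
    exact ⟨(cx, cy, "@"), h, by simp⟩

lemma whGet?_at (warehouse : List (Int × Int × String))
    (h : Pre_Removeables warehouse) (i : Int × Int) :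
    (whGet? warehouse i = some "@") ↔ (i.1, i.2, "@") ∈ warehouse := by
  unfold Pre_Removeables at h
  obtain ⟨i1, i2⟩ := i
  induction warehouse with
  | nil => simp [whGet?]
  | cons e t ih =>
    obtain ⟨x, y, v⟩ := e
    simp only [List.map_cons, List.nodup_cons, List.mem_map] at h
    obtain ⟨hk, ht⟩ := h
    rw [show whGet? ((x, y, v) :: t) (i1, i2)
          = if (x, y) = (i1, i2) then some v else whGet? t (i1, i2) from rfl]
    by_cases hxy : (x, y) = (i1, i2)
    · obtain ⟨h1, h2⟩ : x = i1 ∧ y = i2 := by simpa [Prod.ext_iff] using hxy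
      subst h1 h2
      simp only [if_true, List.mem_cons, Option.some.injEq]
      constructor
      · rintro rfl; left; rfl
      · rintro (h | h)
        · simp_all
        · exact absurd ⟨(x, y, "@"), h, rfl⟩ hk
    · rw [if_neg hxy, ih ht]
      simp only [List.mem_cons]
      constructor
      · exact Or.inr
      · rintro (h | h)
        · exact absurd (by simp_all [Prod.ext_iff]) hxy
        · exact h

lemma mem_Neighbors_iff (a c : Int × Int) : a ∈ Neighbors c ↔ near a c = true := by
  obtain ⟨ax, ay⟩ := a; obtain ⟨cx, cy⟩ := c
  simp [Neighbors, near, Prod.ext_iff]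
  omega

lemma nodup_Neighbors (c : Int × Int) : (Neighbors c).Nodup := by
  obtain ⟨cx, cy⟩ := c
  simp [Neighbors, Prod.ext_iff]
  omega

lemma nodup_atsOf (warehouse : List (Int × Int × String)) (h : Pre_Removeables warehouse) :
    (atsOf warehouse).Nodup := by
  rw [atsOf_eq]
  exact h.sublist (List.Sublist.map _ List.filter_sublist)

lemma countP_mem_comm (l m : List (Int × Int)) (hl : l.Nodup) (hm : m.Nodup) :
    l.countP (fun a => decide (a ∈ m)) = m.countP (fun a => decide (a ∈ l)) := by
  rw [List.countP_eq_length_filter, List.countP_eq_length_filter,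
      ← List.toFinset_card_of_nodup (hl.filter _), ← List.toFinset_card_of_nodup (hm.filter _),
      List.toFinset_filter, List.toFinset_filter]
  congr 1
  ext a
  simp
  tauto

lemma count_eq (wh : List (Int × Int × String)) (h : Pre_Removeables wh) (c : Int × Int) :
    cntA wh c = (atsOf wh).countP (fun a => near a c) := by
  unfold cntA
  rw [← List.countP_eq_length_filter]
  rw [List.countP_congr (q := fun i => decide (i ∈ atsOf wh)) (fun a _ => by
    rw [Bool.eq_iff_iff]
    simp [whGet?_at wh h a, mem_atsOf])]
  rw [countP_mem_comm (Neighbors c) (atsOf wh) (nodup_Neighbors c) (nodup_atsOf wh h)]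
  refine List.countP_congr (fun a _ => ?_)
  simpa using mem_Neighbors_iff a c

lemma foldl_items (wh rest : List (Int × Int × String)) (d : PySem.Dict (Int × Int) String)
    (hfresh : ∀ e ∈ rest, d.contains (e.1, e.2.1) = false)
    (hnd : (rest.map (fun e => (e.1, e.2.1))).Nodup) :
    (rest.foldl (stepA wh) d).items
      = d.items ++ rest.filterMap (fun e =>
          if e.2.2 = "@" then
            (if cntA wh (e.1, e.2.1) < 4 then some ((e.1, e.2.1), "x") else none)
          else none) := by
  induction rest generalizing d with
  | nil => simp
  | cons e t ih =>
    simp only [List.map_cons, List.nodup_cons, List.mem_map] at hnd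
    obtain ⟨hkey, hnd⟩ := hnd
    rw [List.foldl_cons, List.filterMap_cons]
    by_cases hv : e.2.2 = "@"
    · by_cases hc : cntA wh (e.1, e.2.1) < 4
      · have hstep : stepA wh d e = d.insert (e.1, e.2.1) "x" := by
          simp [stepA, hv, hc]
        rw [hstep, hv, if_pos rfl, if_pos hc]
        rw [ih _ (fun e' he' => by
          rw [PySem.Dict.contains_insert]
          have h1 : ((e'.1, e'.2.1) == (e.1, e.2.1)) = false := by
            simp only [beq_eq_false_iff_ne, ne_eq]
            exact fun hh => hkey ⟨e', he', hh⟩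
          rw [h1, hfresh e' (List.mem_cons_of_mem _ he'), Bool.or_self]) hnd]
        rw [PySem.Dict.items_insert, hfresh e (List.mem_cons_self ..)]
        simp
      · have hstep : stepA wh d e = d := by simp [stepA, hv, hc]
        rw [hstep, hv, if_pos rfl, if_neg hc]
        exact ih _ (fun e' he' => hfresh e' (List.mem_cons_of_mem _ he')) hnd
    · have hstep : stepA wh d e = d := by simp [stepA, hv]
      rw [hstep, if_neg hv]
      exact ih _ (fun e' he' => hfresh e' (List.mem_cons_of_mem _ he')) hnd

-- ===== VERDICT (by name: the statement is the Claim_ definition above) =====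
theorem Removeables_spec : Claim_equal_Removeables := by
  intro wh _hdom hpre
  show Removeables wh = Removeables_alt wh
  have hA : Removeables wh
      = ((wh.foldl (stepA wh) PySem.Dict.empty).items).map (fun p => (p.1.1, p.1.2, p.2)) := rfl
  have hB : Removeables_alt wh
      = (atsOf wh).filterMap
          (fun c => if (atsOf wh).countP (fun a => near a c) < 4
                    then some (c.1, c.2, "x") else none) := rfl
  rw [hA, hB, foldl_items wh wh PySem.Dict.empty (fun e _ => by simp) hpre,
      show PySem.Dict.empty.items = ([] : List ((Int × Int) × String)) from rfl,
      List.nil_append]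
  unfold atsOf
  rw [List.filterMap_filterMap, List.map_filterMap]
  apply List.filterMap_congr
  intro e _
  by_cases hv : e.2.2 = "@"
  · rw [if_pos hv, if_pos hv]
    rw [count_eq wh hpre (e.1, e.2.1)]
    unfold atsOf
    by_cases hc : (wh.filterMap (fun e => if e.2.2 = "@" then some (e.1, e.2.1) else none)).countP
        (fun a => near a (e.1, e.2.1)) < 4
    · simp only [if_pos hc, Option.map_some, Option.bind_some]
    · simp only [if_neg hc, Option.map_none, Option.bind_some]
  · rw [if_neg hv, if_neg hv]; simp
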